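-- pv_equiv track=rewrite | github.com/wanghaoplus/gatog | aw/instruments/TestBoard/TestBoard.py | binaryGenCrc
-- ===== SOURCE A (Python) =====
-- def binaryGenCrc(src_data):
--     checksum1 = 0
--     checksum2 = 0
--     length = len(src_data)
--     for i in range(0, length):
--         checksum1 += src_data[i]
--         checksum2 += checksum1
--     checksum2 &= 0xFF
--     result = ((checksum1 << 8) + checksum2)&0xFFFF
--     return result
-- ===== SOURCE B (Python) =====
-- def binaryGenCrc(src_data):
--     checksum1 = sum(src_data)
--     length = len(src_data)
--     checksum2 = sum((length - i) * v for i, v in enumerate(src_data))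
--     checksum2 &= 0xFF
--     result = ((checksum1 << 8) + checksum2) & 0xFFFF
--     return result
-- ===== Notes on version B (the rewrite author's own statement) =====
-- stated objective: alternative
-- what changed: Replaces the accumulator-passing prefix-sum recurrence (checksum2 += running checksum1 per index) with a direct closed-form weighting: checksum1 = sum(src_data) and checksum2 = sum((length-i)*v over enumerate), then the same masking.
import Mathlib
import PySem

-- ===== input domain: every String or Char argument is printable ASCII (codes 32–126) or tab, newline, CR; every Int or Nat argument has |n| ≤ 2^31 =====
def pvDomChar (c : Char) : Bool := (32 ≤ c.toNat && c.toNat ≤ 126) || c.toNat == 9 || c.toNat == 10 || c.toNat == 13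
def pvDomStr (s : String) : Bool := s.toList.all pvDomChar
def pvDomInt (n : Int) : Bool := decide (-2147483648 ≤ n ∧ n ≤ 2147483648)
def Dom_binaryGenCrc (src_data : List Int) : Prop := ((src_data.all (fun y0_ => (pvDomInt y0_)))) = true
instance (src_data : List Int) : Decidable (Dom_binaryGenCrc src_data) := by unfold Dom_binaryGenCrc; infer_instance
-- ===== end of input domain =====

-- B replaces the running prefix-sum accumulator with a direct closed-form weighting
-- Σ (length-i)·src_data[i] for checksum2 and sum(src_data) for checksum1 (alternative decomposition, same cost).
-- ===== PORT A =====
def binaryGenCrc (src_data : List Int) : Int :=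
  let length : Int := PySem.List.len src_data
  let st :=
    (PySem.List.pyRange 0 length 1).foldl
      (fun (st : Int × Int) i =>
        let checksum1 := st.1 + PySem.List.pyGetD src_data i 0
        (checksum1, st.2 + checksum1)) (0, 0)
  let checksum2 := PySem.Int.band st.2 255
  PySem.Int.band ((st.1 <<< 8) + checksum2) 65535

-- ===== PORT B =====
def binaryGenCrc_alt (src_data : List Int) : Int :=
  let checksum1 := src_data.sum
  let length : Int := PySem.List.len src_data
  let checksum2 :=
    ((PySem.List.enumerate src_data 0).map (fun p => (length - p.1) * p.2)).sum
  let checksum2' := PySem.Int.band checksum2 255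
  PySem.Int.band ((checksum1 <<< 8) + checksum2') 65535

-- ===== PRECONDITION & SPEC =====
def Spec_binaryGenCrc (src_data : List Int) (out : Int) : Prop := out = binaryGenCrc_alt src_data
instance (src_data : List Int) (out : Int) : Decidable (Spec_binaryGenCrc src_data out) := by unfold Spec_binaryGenCrc; infer_instance

-- ===== CLAIM (what is proved, stated in full; the proofs are below) =====
def Claim_equal_binaryGenCrc : Prop := ∀ (src_data : List Int), Dom_binaryGenCrc src_data → Spec_binaryGenCrc src_data (binaryGenCrc src_data)

-- ===== LEMMAS AND PROOFS =====

-- ===== VERDICT (by name: the statement is the Claim_ definition above) =====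
-- weighted sum with head weight c, decreasing by one per element
def pvW (xs : List Int) (c : Int) : Int :=
  match xs with
  | [] => 0
  | x :: t => c * x + pvW t (c - 1)

lemma pvW_enum (xs : List Int) (s L : Int) :
    ((PySem.List.enumerate xs s).map (fun p => (L - p.1) * p.2)).sum = pvW xs (L - s) := by
  induction xs generalizing s with
  | nil => simp [pvW]
  | cons x t ih =>
      rw [PySem.List.enumerate_cons]
      simp only [List.map_cons, List.sum_cons, ih (s+1), pvW]
      ring_nf

lemma pvA_loop (xs : List Int) :
    (PySem.List.pyRange 0 (PySem.List.len xs) 1).foldl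
      (fun (st : Int × Int) i =>
        let checksum1 := st.1 + PySem.List.pyGetD xs i 0
        (checksum1, st.2 + checksum1)) (0, 0)
      = xs.foldl (fun (st : Int × Int) x =>
          let c := st.1 + x
          (c, st.2 + c)) (0, 0) :=
  PySem.List.foldl_pyRange_zero_pyGetD xs 0
    (fun (st : Int × Int) x => let c := st.1 + x; (c, st.2 + c)) ((0 : Int), (0 : Int))

lemma pvFold (xs : List Int) (c1 c2 : Int) :
    xs.foldl (fun (st : Int × Int) x =>
        let c := st.1 + x
        (c, st.2 + c)) (c1, c2)
      = (c1 + xs.sum, c2 + (xs.length : Int) * c1 + pvW xs (xs.length : Int)) := by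
  induction xs generalizing c1 c2 with
  | nil => simp [pvW]
  | cons x t ih =>
      simp only [List.foldl_cons, List.sum_cons, ih, pvW, List.length_cons, Prod.mk.injEq]
      constructor <;> (push_cast; ring)

theorem binaryGenCrc_spec : Claim_equal_binaryGenCrc := by
  intro src_data _
  unfold Spec_binaryGenCrc
  simp only [binaryGenCrc, binaryGenCrc_alt]
  rw [pvA_loop, pvFold, pvW_enum src_data 0 (PySem.List.len src_data)]
  simp [PySem.List.len]
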